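-- pv_equiv track=rewrite | github.com/delos0/Image-Processing-Application | src/main/Image_processing.py | misalign
-- ===== SOURCE A (Python) =====
-- def misalign(matrix):
--     temp = [[0 for i in range(len(matrix))] for j in range(len(matrix[0]))]
--
--     for i in range(len(matrix)):
--         for j in range(len(matrix[0])):
--             temp[j][i] = matrix[i][j]
--
--     for i in range(len(temp)):
--         if i%2==1:
--             temp[i] = temp[i][::-1]
--
--     for i in range(len(matrix)):
--         for j in range(len(matrix[0])):
--             matrix[i][j] = temp[j][i]
--     return matrix
-- ===== SOURCE B (Python) =====
-- def misalign(matrix):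
--     n = len(matrix)
--     m = len(matrix[0])
--     for j in range(m):
--         if j % 2 == 1:
--             col = [matrix[i][j] for i in range(n)]
--             col.reverse()
--             for i in range(n):
--                 matrix[i][j] = col[i]
--     return matrix
-- ===== Notes on version B (the rewrite author's own statement) =====
-- stated objective: simpler
-- what changed: Replaces the transpose / reverse-odd-rows / transpose-back three-pass with a single pass that reverses each odd-indexed column in place; Pre_ excludes only inputs where A raises IndexError (empty matrix, or a row shorter than the first row).
import Mathlib
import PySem

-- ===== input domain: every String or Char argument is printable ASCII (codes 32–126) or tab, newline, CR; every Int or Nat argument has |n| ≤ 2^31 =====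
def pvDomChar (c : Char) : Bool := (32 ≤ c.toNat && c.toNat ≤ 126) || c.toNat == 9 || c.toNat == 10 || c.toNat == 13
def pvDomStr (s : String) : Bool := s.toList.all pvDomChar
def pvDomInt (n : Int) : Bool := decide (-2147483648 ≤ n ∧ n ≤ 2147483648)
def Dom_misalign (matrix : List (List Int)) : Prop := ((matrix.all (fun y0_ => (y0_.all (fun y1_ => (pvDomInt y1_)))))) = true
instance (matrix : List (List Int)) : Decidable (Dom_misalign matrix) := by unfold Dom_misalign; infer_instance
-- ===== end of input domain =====

-- B replaces A's transpose / reverse-odd-rows / transpose-back three-pass with a single pass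
-- that reverses each odd-indexed column of the matrix in place (same return value; like A,
-- the Python B mutates its argument in place).

-- ===== PORT A =====
-- Literal port of A: build the transpose `temp`, reverse its odd rows, write it back.
-- Python's in-place element writes become List.set; reads matrix[i][j] use getD (indices are
-- in range on every input Pre_ admits; Python raises exactly where Pre_ is false).
def misalign (matrix : List (List Int)) : List (List Int) :=
  let n := matrix.length
  let m := (matrix.headD []).length
  let temp0 := List.replicate m (List.replicate n (0 : Int))
  let temp1 := (List.range n).foldl (fun t i =>
      (List.range m).foldl (fun t j =>
        t.set j ((t.getD j []).set i ((matrix.getD i []).getD j 0))) t) temp0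
  let temp2 := (List.range temp1.length).foldl (fun t i =>
      if i % 2 = 1 then t.set i ((t.getD i []).reverse) else t) temp1
  (List.range n).foldl (fun mat i =>
      (List.range m).foldl (fun mat j =>
        mat.set i ((mat.getD i []).set j ((temp2.getD j []).getD i 0))) mat) matrix

-- ===== PORT B =====
-- Literal port of B: for every odd column index j, read column j, reverse it, write it back.
def misalign_alt (matrix : List (List Int)) : List (List Int) :=
  let n := matrix.length
  let m := (matrix.headD []).length
  (List.range m).foldl (fun mat j =>
    if j % 2 = 1 then
      let col := ((List.range n).map (fun i => (mat.getD i []).getD j 0)).reverse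
      (List.range n).foldl (fun mat' i =>
        mat'.set i ((mat'.getD i []).set j (col.getD i 0))) mat
    else mat) matrix

-- ===== PRECONDITION & SPEC =====
-- Pre_ holds exactly where the Python A returns: the matrix is nonempty and no row is shorter
-- than the first row (otherwise matrix[0] / matrix[i][j] raises IndexError).
def Pre_misalign (matrix : List (List Int)) : Prop :=
  matrix ≠ [] ∧ ∀ row ∈ matrix, (matrix.headD []).length ≤ row.length
instance (matrix : List (List Int)) : Decidable (Pre_misalign matrix) := by
  unfold Pre_misalign; infer_instance
def pvWitness_misalign : List (List Int) := [[1, 2, 3], [4, 5, 6], [7, 8, 9]]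

def Spec_misalign (matrix : List (List Int)) (out : List (List Int)) : Prop := out = misalign_alt matrix
instance (matrix : List (List Int)) (out : List (List Int)) : Decidable (Spec_misalign matrix out) := by unfold Spec_misalign; infer_instance

-- ===== CLAIM (what is proved, stated in full; the proofs are below) =====
def Claim_equal_misalign : Prop := ∀ (matrix : List (List Int)), Dom_misalign matrix → Pre_misalign matrix → Spec_misalign matrix (misalign matrix)

-- ===== LEMMAS AND PROOFS =====

-- entry (i, j) of the input matrix
def pvEnt (matrix : List (List Int)) (i j : Nat) : Int := (matrix.getD i []).getD j 0

-- entry (i, j) of the common result: odd columns are reversed vertically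
def pvGfun (matrix : List (List Int)) (i j : Nat) : Int :=
  if j % 2 = 1 then pvEnt matrix (matrix.length - 1 - i) j else pvEnt matrix i j

-- the common result
def pvOutRow (matrix : List (List Int)) (i : Nat) : List Int :=
  (List.range (matrix.headD []).length).map (pvGfun matrix i)
    ++ (matrix.getD i []).drop (matrix.headD []).length

def pvOutMat (matrix : List (List Int)) : List (List Int) :=
  (List.range matrix.length).map (pvOutRow matrix)

lemma getD_map_range {α : Type} (f : Nat → α) (d : α) {m j : Nat} (h : j < m) :
    ((List.range m).map f).getD j d = f j := by
  simp [List.getD_eq_getElem?_getD, h]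

lemma map_range_getD {α : Type} (l : List α) (d : α) :
    (List.range l.length).map (fun i => l.getD i d) = l := by
  apply List.ext_getElem
  · simp
  · intro i h1 h2
    simp [List.getD_eq_getElem?_getD, h2]

-- the canonical "write loop": foldl over range k, iteration i sets slot i from its old value
lemma foldl_set_range {α : Type} (d : α) (G : Nat → α → α) :
    ∀ (k : Nat) (t : List α), k ≤ t.length →
    (List.range k).foldl (fun s i => s.set i (G i (s.getD i d))) t
      = (List.range k).map (fun i => G i (t.getD i d)) ++ t.drop k := by
  intro k
  induction k with
  | zero => intro t _; simp
  | succ k ih =>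
    intro t hk
    rw [List.range_succ, List.foldl_append, List.map_append, List.foldl_cons, List.foldl_nil,
        ih t (Nat.le_of_succ_le hk)]
    have hkt : k < t.length := hk
    have hlen : ((List.range k).map (fun i => G i (t.getD i d))).length = k := by simp
    have hgetD : ((List.range k).map (fun i => G i (t.getD i d)) ++ t.drop k).getD k d
        = t.getD k d := by
      rw [List.getD_eq_getElem?_getD, List.getElem?_append_right (by omega), hlen]
      simp [List.getD_eq_getElem?_getD]
    rw [hgetD, List.set_append, if_neg (by omega), hlen, Nat.sub_self,
        List.drop_eq_getElem_cons hkt, List.set_cons_zero]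
    simp [List.getD_eq_getElem?_getD, hkt]

-- a loop that repeatedly rewrites one fixed slot i
lemma foldl_setfix {α : Type} (d : α) (i : Nat) (H : Nat → α → α) :
    ∀ (js : List Nat) (s : List α), i < s.length →
    js.foldl (fun s j => s.set i (H j (s.getD i d))) s
      = s.set i (js.foldl (fun r j => H j r) (s.getD i d)) := by
  intro js
  induction js with
  | nil => intro s hi; simp [List.set_getElem_self, List.getD_eq_getElem?_getD, hi]
  | cons j js ih =>
    intro s hi
    rw [List.foldl_cons, ih _ (by simpa using hi), List.set_set, List.foldl_cons]
    congr 1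
    simp [List.getD_eq_getElem?_getD, hi]

-- fold congruence under an invariant
lemma foldl_congr_inv {α β : Type} (P : α → Prop) (f g : α → β → α) :
    ∀ (l : List β) (s : α), P s → (∀ a b, P a → b ∈ l → f a b = g a b) →
      (∀ a b, P a → P (g a b)) → l.foldl f s = l.foldl g s := by
  intro l
  induction l with
  | nil => intro s _ _ _; rfl
  | cons b l ih =>
    intro s hs hagree hpres
    rw [List.foldl_cons, List.foldl_cons, hagree s b hs (by simp)]
    exact ih _ (hpres s b hs) (fun a b' ha hb' => hagree a b' ha (by simp [hb'])) hpres

lemma pre_row_len {matrix : List (List Int)} (h : Pre_misalign matrix) {i : Nat}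
    (hi : i < matrix.length) : (matrix.headD []).length ≤ (matrix.getD i []).length := by
  have : matrix.getD i [] = matrix[i] := by
    simp [List.getD_eq_getElem?_getD, hi]
  rw [this]
  exact h.2 _ (List.getElem_mem hi)

-- A's result, characterised
lemma misalign_char (matrix : List (List Int)) (h : Pre_misalign matrix) :
    misalign matrix = pvOutMat matrix := by
  unfold misalign
  dsimp only
  set n := matrix.length with hn
  set m := (matrix.headD []).length with hm
  have hrow : ∀ i < n, m ≤ (matrix.getD i []).length := fun i hi => pre_row_len h hi
  -- step 1: the transpose-building double loop
  have h1 : (List.range n).foldl (fun t i =>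
      (List.range m).foldl (fun t j =>
        t.set j ((t.getD j []).set i ((matrix.getD i []).getD j 0))) t)
      (List.replicate m (List.replicate n (0 : Int)))
      = (List.range m).map (fun j => (List.range n).map (fun i => pvEnt matrix i j)) := by
    have gen : ∀ k, (List.range k).foldl (fun t i =>
        (List.range m).foldl (fun t j =>
          t.set j ((t.getD j []).set i ((matrix.getD i []).getD j 0))) t)
        (List.replicate m (List.replicate n (0 : Int)))
        = (List.range m).map (fun j =>
            (List.range k).foldl (fun r i => r.set i (pvEnt matrix i j))
              (List.replicate n (0 : Int))) := by
      intro k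
      induction k with
      | zero => simp [List.map_const']
      | succ k ih =>
        rw [List.range_succ, List.foldl_append, ih, List.foldl_cons, List.foldl_nil]
        rw [foldl_set_range ([] : List Int)
            (fun j row => row.set k ((matrix.getD k []).getD j 0)) m _ (by simp)]
        have hdropm : List.drop m ((List.range m).map (fun j =>
            (List.range k).foldl (fun r i => r.set i (pvEnt matrix i j))
              (List.replicate n (0 : Int)))) = [] := by
          simp [List.drop_eq_nil_iff]
        rw [hdropm, List.append_nil]
        apply List.map_congr_left
        intro j hj'
        have hj : j < m := List.mem_range.mp hj'
        rw [getD_map_range _ _ hj, List.foldl_append, List.foldl_cons, List.foldl_nil]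
        rfl
    rw [gen n]
    apply List.map_congr_left
    intro j _
    rw [foldl_set_range (0 : Int) (fun i _ => pvEnt matrix i j) n _ (by simp)]
    simp
  rw [h1]
  -- step 2: reversing the odd rows of the transpose
  have hlen1 : ((List.range m).map (fun j => (List.range n).map (fun i => pvEnt matrix i j))).length = m := by simp
  rw [hlen1]
  have h2 : (List.range m).foldl (fun t i =>
      if i % 2 = 1 then t.set i ((t.getD i []).reverse) else t)
      ((List.range m).map (fun j => (List.range n).map (fun i => pvEnt matrix i j)))
      = (List.range m).map (fun j =>
          if j % 2 = 1 then ((List.range n).map (fun i => pvEnt matrix i j)).reverse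
          else (List.range n).map (fun i => pvEnt matrix i j)) := by
    rw [foldl_congr_inv (fun t => t.length = m) _
        (fun t i => t.set i (if i % 2 = 1 then (t.getD i []).reverse else t.getD i []))
        (List.range m) _ (by simp)
        (by
          intro t i ht hi'
          have hi : i < m := List.mem_range.mp hi'
          by_cases hodd : i % 2 = 1
          · simp [hodd]
          · have hi2 : i < t.length := by omega
            simp only [if_neg hodd]
            rw [List.getD_eq_getElem?_getD, List.getElem?_eq_getElem hi2]
            simp [List.set_getElem_self])
        (by intro t i ht; simpa using ht)]
    rw [foldl_set_range ([] : List Int)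
        (fun i r => if i % 2 = 1 then r.reverse else r) m _ (by simp)]
    have hdropm : List.drop m ((List.range m).map (fun j => (List.range n).map (fun i => pvEnt matrix i j))) = [] := by
      simp [List.drop_eq_nil_iff]
    rw [hdropm, List.append_nil]
    apply List.map_congr_left
    intro j hj'
    rw [getD_map_range _ _ (List.mem_range.mp hj')]
  rw [h2]
  -- step 3: writing the result back into the matrix
  set temp2v := (List.range m).map (fun j =>
      if j % 2 = 1 then ((List.range n).map (fun i => pvEnt matrix i j)).reverse
      else (List.range n).map (fun i => pvEnt matrix i j)) with htemp2v
  rw [foldl_congr_inv (fun mat => mat.length = n) _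
      (fun mat i => mat.set i ((List.range m).foldl
        (fun r j => r.set j ((temp2v.getD j []).getD i 0)) (mat.getD i [])))
      (List.range n) matrix rfl
      (by
        intro mat i hmat hi'
        have hi : i < mat.length := by rw [hmat]; exact List.mem_range.mp hi'
        exact foldl_setfix ([] : List Int) i
          (fun j row => row.set j ((temp2v.getD j []).getD i 0)) (List.range m) mat hi)
      (by intro mat i hmat; simpa using hmat)]
  rw [foldl_set_range ([] : List Int)
      (fun i row => (List.range m).foldl
        (fun r j => r.set j ((temp2v.getD j []).getD i 0)) row) n matrix le_rfl]
  rw [List.drop_length]  -- drop n matrix with n = matrix.length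
  rw [List.append_nil]
  unfold pvOutMat pvOutRow
  apply List.map_congr_left
  intro i hi'
  have hi : i < n := List.mem_range.mp hi'
  rw [foldl_set_range (0 : Int)
      (fun j _ => (temp2v.getD j []).getD i 0) m _ (hrow i hi)]
  congr 1
  apply List.map_congr_left
  intro j hj'
  have hj : j < m := List.mem_range.mp hj'
  rw [htemp2v, getD_map_range _ _ hj]
  by_cases hodd : j % 2 = 1
  · rw [if_pos hodd]
    have hin : i < ((List.range n).map (fun i => pvEnt matrix i j)).reverse.length := by simp [hi]
    rw [List.getD_eq_getElem?_getD, List.getElem?_eq_getElem hin, List.getElem_reverse]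
    simp [pvGfun, hodd, hn]
  · rw [if_neg hodd, getD_map_range _ _ hi]
    simp [pvGfun, hodd]

-- B's result, characterised
lemma misalign_alt_char (matrix : List (List Int)) (h : Pre_misalign matrix) :
    misalign_alt matrix = pvOutMat matrix := by
  unfold misalign_alt
  set n := matrix.length with hn
  set m := (matrix.headD []).length with hm
  have hrow : ∀ i < n, m ≤ (matrix.getD i []).length := fun i hi => pre_row_len h hi
  have hrowget : ∀ i, i < n → ∀ k, k < m → (matrix.getD i [])[k]? = some (pvEnt matrix i k) := by
    intro i hi k hk
    have hlt : k < (matrix[i]?.getD []).length := lt_of_lt_of_le hk (hrow i hi)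
    simp only [pvEnt, List.getD_eq_getElem?_getD, List.getElem?_eq_getElem hlt, Option.getD_some]
  have key : ∀ k, k ≤ m → (List.range k).foldl (fun mat j =>
      if j % 2 = 1 then
        let col := ((List.range n).map (fun i => (mat.getD i []).getD j 0)).reverse
        (List.range n).foldl (fun mat' i =>
          mat'.set i ((mat'.getD i []).set j (col.getD i 0))) mat
      else mat) matrix
      = (List.range n).map (fun i =>
          (List.range k).map (pvGfun matrix i) ++ (matrix.getD i []).drop k) := by
    intro k
    induction k with
    | zero =>
      intro _
      simpa using (map_range_getD matrix ([] : List Int)).symm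
    | succ k ih =>
      intro hk1
      have hk : k < m := hk1
      rw [List.range_succ, List.foldl_append, ih (Nat.le_of_succ_le hk1),
          List.foldl_cons, List.foldl_nil]
      set mk := (List.range n).map (fun i =>
          (List.range k).map (pvGfun matrix i) ++ (matrix.getD i []).drop k) with hmk
      have hmklen : mk.length = n := by simp [hmk]
      have hgetDk : ∀ i, i < n → mk.getD i []
          = (List.range k).map (pvGfun matrix i) ++ (matrix.getD i []).drop k := by
        intro i hi
        exact getD_map_range _ _ hi
      have hkrow : ∀ i, i < n → k < (matrix.getD i []).length :=
        fun i hi => lt_of_lt_of_le hk (hrow i hi)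
      have hdropk : ∀ i, i < n → (matrix.getD i []).drop k
          = pvEnt matrix i k :: (matrix.getD i []).drop (k + 1) := by
        intro i hi
        rw [List.drop_eq_getElem_cons (hkrow i hi)]
        congr 1
        have h2 := hrowget i hi k hk
        rw [List.getElem?_eq_getElem (hkrow i hi)] at h2
        exact Option.some.inj h2
      have hstep : ∀ i, i < n →
          (List.range k ++ [k]).map (pvGfun matrix i) ++ (matrix.getD i []).drop (k+1)
          = (List.range k).map (pvGfun matrix i)
              ++ (pvGfun matrix i k :: (matrix.getD i []).drop (k+1)) := by
        intro i hi
        rw [List.map_append]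
        simp
      by_cases hodd : k % 2 = 1
      · rw [if_pos hodd]
        have hcolval : ∀ i, i < n → (mk.getD i []).getD k 0 = pvEnt matrix i k := by
          intro i hi
          rw [hgetDk i hi, List.getD_eq_getElem?_getD,
              List.getElem?_append_right (by simp), List.getElem?_drop]
          simp [pvEnt, List.getD_eq_getElem?_getD]
        have hcol : ((List.range n).map (fun i => (mk.getD i []).getD k 0))
            = (List.range n).map (fun i => pvEnt matrix i k) := by
          apply List.map_congr_left
          intro i hi
          exact hcolval i (List.mem_range.mp hi)
        have hcolrev : ∀ i, i < n →
            (((List.range n).map (fun i => (mk.getD i []).getD k 0)).reverse).getD i 0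
            = pvEnt matrix (n - 1 - i) k := by
          intro i hi
          rw [hcol, List.getD_eq_getElem?_getD,
              List.getElem?_eq_getElem (by simp [hi]), List.getElem_reverse]
          simp
        rw [foldl_set_range ([] : List Int)
            (fun i row => row.set k ((((List.range n).map (fun i => (mk.getD i []).getD k 0)).reverse).getD i 0))
            n mk (by omega)]
        have hdropn : List.drop n mk = [] := by rw [← hmklen]; exact List.drop_length
        rw [hdropn, List.append_nil]
        apply List.map_congr_left
        intro i hi'
        have hi : i < n := List.mem_range.mp hi'
        rw [hgetDk i hi, hcolrev i hi, List.set_append, if_neg (by simp),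
            hdropk i hi]
        simp only [List.length_map, List.length_range, Nat.sub_self, List.set_cons_zero]
        rw [hstep i hi]
        congr 2
        simp [pvGfun, hodd, hn]
      · rw [if_neg hodd]
        apply List.map_congr_left
        intro i hi'
        have hi : i < n := List.mem_range.mp hi'
        rw [hstep i hi, hdropk i hi]
        congr 2
        simp [pvGfun, hodd]
  rw [key m le_rfl]
  unfold pvOutMat pvOutRow
  rfl

-- ===== VERDICT (by name: the statement is the Claim_ definition above) =====
theorem misalign_spec : Claim_equal_misalign := by
  intro matrix _ hpre
  unfold Spec_misalign
  rw [misalign_char matrix hpre, misalign_alt_char matrix hpre]
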